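-- pv_equiv track=rewrite | github.com/sabinahorincar/bidding | bidding.py | get_won_price
-- ===== SOURCE A (Python) =====
-- def get_person_max_bid(values):
--     return 0 if values == [] else max(values)
--
-- def get_won_price(buyers_dictionary, winner):
--     won_price = 0
--     filtered_buyers_dict = {key:value for (key, value) in buyers_dictionary.items() if key != winner}
--
--     for key, values in filtered_buyers_dict.items():
--         max_bid_of_person = get_person_max_bid(values)
--         if won_price < max_bid_of_person:
--             won_price = max_bid_of_person
--     return won_price
-- ===== SOURCE B (Python) =====
-- def get_won_price(buyers_dictionary, winner):
--     bids = sorted(bid for key, values in buyers_dictionary.items()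
--                   if key != winner for bid in values)
--     return bids[-1] if bids and bids[-1] > 0 else 0
-- ===== Notes on version B (the rewrite author's own statement) =====
-- stated objective: alternative
-- what changed: Replaces A's per-person-max helper plus running-max comparison loop over a filtered dict with sort-then-pick: collect all non-winner bids, sort them ascending, and return the last (largest) element if it is positive, else 0.
import Mathlib
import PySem

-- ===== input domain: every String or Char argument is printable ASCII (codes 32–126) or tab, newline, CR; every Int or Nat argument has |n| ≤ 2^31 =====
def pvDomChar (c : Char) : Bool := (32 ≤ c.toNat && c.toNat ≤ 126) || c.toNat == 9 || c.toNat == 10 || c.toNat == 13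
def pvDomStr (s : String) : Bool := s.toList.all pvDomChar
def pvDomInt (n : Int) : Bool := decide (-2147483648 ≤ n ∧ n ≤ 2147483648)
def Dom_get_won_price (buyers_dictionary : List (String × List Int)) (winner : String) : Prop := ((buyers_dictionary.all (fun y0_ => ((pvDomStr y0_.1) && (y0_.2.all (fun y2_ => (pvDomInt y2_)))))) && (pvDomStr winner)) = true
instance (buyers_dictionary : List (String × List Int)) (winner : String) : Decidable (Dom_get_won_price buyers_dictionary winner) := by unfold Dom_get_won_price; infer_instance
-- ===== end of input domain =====

-- B replaces A's per-person-max helper and running-max loop over a filtered dict with a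
-- sort-then-pick algorithm: sort all non-winner bids ascending and take the last element,
-- floored at 0 — a genuinely different (sort-based) algorithm of similar practical cost.


-- ===== PORT A =====
def get_person_max_bid (values : List Int) : Int :=
  if values = [] then 0
  else match PySem.List.max? values (fun x => x) with
       | some m => m
       | none => 0  -- unreachable: values ≠ [] here

def get_won_price (buyers_dictionary : List (String × List Int)) (winner : String) : Int :=
  let filtered_buyers_dict := buyers_dictionary.filter (fun kv => kv.1 ≠ winner)
  filtered_buyers_dict.foldl
    (fun won_price kv =>
      let max_bid_of_person := get_person_max_bid kv.2
      if won_price < max_bid_of_person then max_bid_of_person else won_price) 0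

-- ===== PORT B =====
def get_won_price_alt (buyers_dictionary : List (String × List Int)) (winner : String) : Int :=
  let bids : List Int :=
    PySem.List.sorted
      (buyers_dictionary.flatMap (fun kv => if kv.1 ≠ winner then kv.2 else []))
      (fun x => x) false
  match bids.getLast? with          -- bids[-1] if bids else the 0 branch
  | some m => if 0 < m then m else 0
  | none => 0

-- ===== PRECONDITION & SPEC =====
def Spec_get_won_price (buyers_dictionary : List (String × List Int)) (winner : String) (out : Int) : Prop := out = get_won_price_alt buyers_dictionary winner
instance (buyers_dictionary : List (String × List Int)) (winner : String) (out : Int) : Decidable (Spec_get_won_price buyers_dictionary winner out) := by unfold Spec_get_won_price; infer_instance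

-- ===== CLAIM (what is proved, stated in full; the proofs are below) =====
def Claim_equal_get_won_price : Prop := ∀ (buyers_dictionary : List (String × List Int)) (winner : String), Dom_get_won_price buyers_dictionary winner → Spec_get_won_price buyers_dictionary winner (get_won_price buyers_dictionary winner)

-- ===== LEMMAS AND PROOFS =====

theorem foldl_max_max (t : List Int) (a v : Int) :
    max a (t.foldl max v) = t.foldl max (max a v) := by
  induction t generalizing v with
  | nil => rfl
  | cons h tl ih =>
      simp only [List.foldl_cons]
      rw [ih (max v h), max_assoc]

theorem step_eq_foldl_max (vs : List Int) (acc : Int) (hacc : 0 ≤ acc) :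
    (if acc < get_person_max_bid vs then get_person_max_bid vs else acc) = vs.foldl max acc := by
  cases vs with
  | nil =>
      have h0 : get_person_max_bid [] = 0 := rfl
      rw [h0, List.foldl_nil, if_neg (by omega)]
  | cons v t =>
      have h : get_person_max_bid (v :: t) = t.foldl max v := by
        simp [get_person_max_bid, PySem.List.max?_id_cons]
      rw [h, List.foldl_cons, ← foldl_max_max]
      rcases le_or_gt (t.foldl max v) acc with h1 | h1
      · rw [if_neg (not_lt.mpr h1), max_eq_left h1]
      · rw [if_pos h1, max_eq_right (le_of_lt h1)]

theorem main_fold (L : List (String × List Int)) (winner : String) (acc : Int) (hacc : 0 ≤ acc) :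
    (L.filter (fun kv => kv.1 ≠ winner)).foldl
      (fun won_price kv =>
        let m := get_person_max_bid kv.2
        if won_price < m then m else won_price) acc
    = (L.flatMap (fun kv => if kv.1 ≠ winner then kv.2 else [])).foldl max acc := by
  induction L generalizing acc with
  | nil => rfl
  | cons kv t ih =>
      by_cases hk : kv.1 = winner
      · simp only [List.filter_cons, List.flatMap_cons, hk, ne_eq, not_true_eq_false,
          decide_false, if_false, Bool.false_eq_true, List.nil_append]
        exact ih acc hacc
      · simp only [List.filter_cons, List.flatMap_cons, ne_eq, hk, not_false_eq_true,
          decide_true, if_true, List.foldl_cons, List.foldl_append]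
        rw [step_eq_foldl_max kv.2 acc hacc, ih]
        exact le_trans hacc (PySem.List.le_foldl_max kv.2 acc).1

-- last element of a ≤-sorted list bounds every element
theorem getLast?_pairwise_ub (zs : List Int) (m : Int)
    (hp : zs.Pairwise (· ≤ ·)) (h : zs.getLast? = some m) : ∀ y ∈ zs, y ≤ m := by
  induction zs with
  | nil => simp at h
  | cons a t ih =>
      cases t with
      | nil =>
          simp only [List.getLast?_singleton, Option.some.injEq] at h
          intro y hy; simp at hy; omega
      | cons b u =>
          have ht : (b :: u).getLast? = some m := by
            rw [← h]; simp [List.getLast?_cons_cons]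
          have hmem : m ∈ b :: u := List.mem_of_getLast? ht
          have hub := ih (List.Pairwise.of_cons hp) ht
          intro y hy
          rcases List.mem_cons.mp hy with rfl | hy
          · exact (List.pairwise_cons.mp hp).1 m hmem
          · exact hub y hy

theorem foldl_max_eq (ys : List Int) (m : Int)
    (hmem : m ∈ ys) (hub : ∀ y ∈ ys, y ≤ m) : ys.foldl max 0 = max 0 m := by
  have h1 := PySem.List.le_foldl_max ys (0 : Int)
  have hle : ys.foldl max 0 ≤ max 0 m := by
    rcases PySem.List.foldl_max_mem ys (0 : Int) with h | h
    · omega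
    · have := hub _ h; omega
  have hge : max 0 m ≤ ys.foldl max 0 := by
    have := h1.2 m hmem; have := h1.1; omega
  omega

-- ===== VERDICT (by name: the statement is the Claim_ definition above) =====
theorem get_won_price_spec : Claim_equal_get_won_price := by
  intro bd winner _
  show get_won_price bd winner = get_won_price_alt bd winner
  simp only [get_won_price, get_won_price_alt]
  rw [main_fold bd winner 0 le_rfl]
  set ys := bd.flatMap (fun kv => if kv.1 ≠ winner then kv.2 else []) with hys
  set zs := PySem.List.sorted ys (fun x => x) false with hzs
  cases hlast : zs.getLast? with
  | none =>
      have hznil : zs = [] := List.getLast?_eq_none_iff.mp hlast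
      have : ys = [] := by
        have := PySem.List.sorted_perm ys (fun x => x) false
        rw [← hzs, hznil] at this
        exact (List.Perm.nil_eq this).symm
      simp [this]
  | some m =>
      have hperm := PySem.List.sorted_perm ys (fun x => x) false
      rw [← hzs] at hperm
      have hp : zs.Pairwise (· ≤ ·) := by
        have := PySem.List.sorted_pairwise ys (fun x => x)
        rw [← hzs] at this; exact this
      have hub : ∀ y ∈ ys, y ≤ m := by
        intro y hy
        exact getLast?_pairwise_ub zs m hp hlast y ((hperm.mem_iff).mpr hy)
      have hmem : m ∈ ys := hperm.mem_iff.mp (List.mem_of_getLast? hlast)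
      rw [foldl_max_eq ys m hmem hub]
      show max 0 m = if 0 < m then m else 0
      split_ifs with h <;> omega
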